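-- pv_equiv track=rewrite | github.com/CirbuildProject/Cirbuild-Spec2RTL | spec2rtl/memory/short_term_memory.py | extract_module_context
-- ===== SOURCE A (Python) =====
-- from typing import Any
--
-- def extract_module_context(
--
--     messages: list[dict[str, Any]],
--     module_name: str,
-- ) -> list[dict[str, Any]]:
--     """Extract only messages relevant to a specific module.
--
--     Args:
--         messages: Full message history.
--         module_name: Target module (e.g., 'Module 2', 'Module 3').
--
--     Returns:
--         Filtered messages relevant to the module.
--     """
--     context: list[dict[str, Any]] = []
--
--     # Find messages containing the module name or recent messages
--     found_module = False
--     for msg in reversed(messages):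
--         content = msg.get("content", "")
--         if module_name.lower() in content.lower():
--             found_module = True
--
--         if found_module:
--             context.insert(0, msg)
--
--             # Stop at previous module boundary
--             prev_modules = ["module 1", "module 2", "module 3", "module 4"]
--             for pm in prev_modules:
--                 if pm != module_name.lower() and pm in content.lower():
--                     break
--
--     return context if context else messages[-5:]  # Fallback to last 5 messages
-- ===== SOURCE B (Python) =====
-- def extract_module_context(messages, module_name):
--     needle = module_name.lower()
--     last = -1
--     for i, msg in enumerate(messages):
--         if needle in msg.get("content", "").lower():
--             last = i
--     if last == -1:
--         return messages[-5:]
--     return messages[:last + 1]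
-- ===== Notes on version B (the rewrite author's own statement) =====
-- stated objective: simpler
-- what changed: Replaces A's reversed-traversal with a found flag, prepend-accumulation via insert(0) and a no-op inner prev_modules loop by one forward pass recording the index of the last matching message, then returning the slice messages[:last+1] (or messages[-5:] if none matched).
import Mathlib
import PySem

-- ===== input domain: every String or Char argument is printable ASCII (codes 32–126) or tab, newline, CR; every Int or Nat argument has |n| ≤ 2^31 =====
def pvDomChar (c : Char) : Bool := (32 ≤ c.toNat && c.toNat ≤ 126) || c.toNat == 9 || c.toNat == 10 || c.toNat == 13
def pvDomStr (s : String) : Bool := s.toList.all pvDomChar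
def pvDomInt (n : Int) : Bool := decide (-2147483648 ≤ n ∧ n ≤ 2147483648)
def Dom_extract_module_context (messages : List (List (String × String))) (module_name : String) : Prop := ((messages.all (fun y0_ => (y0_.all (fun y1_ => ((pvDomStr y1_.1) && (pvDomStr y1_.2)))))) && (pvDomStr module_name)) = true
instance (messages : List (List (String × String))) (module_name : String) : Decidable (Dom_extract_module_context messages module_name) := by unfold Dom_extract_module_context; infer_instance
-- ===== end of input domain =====

-- B replaces A's reversed-traversal prepend-accumulation (with its no-op inner
-- prev_modules loop) by a single forward pass that records the index of the last
-- matching message and returns a slice; objective: simpler.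


-- ===== PORT A =====
-- Literal port of A: iterate over reversed(messages) carrying (found_module, context),
-- context.insert(0, msg) when found_module.  The inner `for pm in prev_modules` loop
-- only `break`s out of itself and changes no state, so it contributes nothing to the value.
def extract_module_context (messages : List (List (String × String))) (module_name : String) : List (List (String × String)) :=
  let st := messages.reverse.foldl
    (fun (st : Bool × List (List (String × String))) msg =>
      let content := (PySem.Dict.mk msg).getD "content" ""
      let found_module := st.1 || PySem.Str.isIn (PySem.Str.lower module_name) (PySem.Str.lower content)
      if found_module then (found_module, PySem.List.insert st.2 0 msg)
      else (found_module, st.2))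
    (false, [])
  let context := st.2
  if context ≠ [] then context else PySem.List.slice messages (some (-5)) none

-- ===== PORT B =====
-- Port of B: one forward pass over enumerate(messages) recording `last`, then slice.
def extract_module_context_alt (messages : List (List (String × String))) (module_name : String) : List (List (String × String)) :=
  let needle := PySem.Str.lower module_name
  let last : Int := (PySem.List.enumerate messages 0).foldl
    (fun (last : Int) p =>
      if PySem.Str.isIn needle (PySem.Str.lower ((PySem.Dict.mk p.2).getD "content" "")) then p.1 else last)
    (-1)
  if last = -1 then PySem.List.slice messages (some (-5)) none
  else PySem.List.slice messages none (some (last + 1))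

-- ===== PRECONDITION & SPEC =====
def Spec_extract_module_context (messages : List (List (String × String))) (module_name : String) (out : List (List (String × String))) : Prop := out = extract_module_context_alt messages module_name
instance (messages : List (List (String × String))) (module_name : String) (out : List (List (String × String))) : Decidable (Spec_extract_module_context messages module_name out) := by unfold Spec_extract_module_context; infer_instance

-- ===== CLAIM (what is proved, stated in full; the proofs are below) =====
def Claim_equal_extract_module_context : Prop := ∀ (messages : List (List (String × String))) (module_name : String), Dom_extract_module_context messages module_name → Spec_extract_module_context messages module_name (extract_module_context messages module_name)

-- ===== LEMMAS AND PROOFS =====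

-- the prefix of l up to (and including) the last element satisfying p; [] if none does
def pvPrefixTo {α : Type} (p : α → Bool) : List α → List α
  | [] => []
  | m :: rest => if p m || rest.any p then m :: pvPrefixTo p rest else []

-- index (relative, as Int) of the last element of l satisfying p (meaningful when l.any p)
def pvLastRel {α : Type} (p : α → Bool) : List α → Int
  | [] => 0
  | m :: rest => if rest.any p then 1 + pvLastRel p rest else 0

theorem pvLastRel_nonneg {α : Type} (p : α → Bool) (l : List α) : 0 ≤ pvLastRel p l := by
  induction l with
  | nil => simp [pvLastRel]
  | cons m rest ih => simp only [pvLastRel]; split <;> omega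

theorem pvPrefixTo_eq_nil {α : Type} (p : α → Bool) (l : List α) (h : l.any p = false) :
    pvPrefixTo p l = [] := by
  cases l with
  | nil => rfl
  | cons mm rest =>
    simp only [List.any_cons, Bool.or_eq_false_iff] at h
    simp [pvPrefixTo, h.1, h.2]

theorem pvPrefixTo_eq_take {α : Type} (p : α → Bool) (l : List α) (h : l.any p = true) :
    pvPrefixTo p l = l.take ((pvLastRel p l).toNat + 1) := by
  induction l with
  | nil => simp at h
  | cons m rest ih =>
    by_cases hr : rest.any p = true
    · have h0 := pvLastRel_nonneg p rest
      simp only [pvPrefixTo, pvLastRel, hr, Bool.or_true, if_true, ih hr, List.take_succ_cons]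
      congr 1
      have : (1 + pvLastRel p rest).toNat = (pvLastRel p rest).toNat + 1 := by omega
      rw [this]
    · simp only [List.any_cons, hr, Bool.or_false] at h
      simp only [pvPrefixTo, pvLastRel, hr, h, Bool.true_or, if_true,
        pvPrefixTo_eq_nil p rest (by simpa using hr)]
      simp

-- A's reversed foldl, written as a foldr, computes (l.any p, pvPrefixTo p l)
theorem pvFoldA {α : Type} (p : α → Bool) (l : List α) :
    l.foldr (fun msg st =>
        let f := st.1 || p msg
        if f then (f, msg :: st.2) else (f, st.2)) ((false, []) : Bool × List α)
      = (l.any p, pvPrefixTo p l) := by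
  induction l with
  | nil => simp [pvPrefixTo]
  | cons m rest ih =>
    simp only [List.foldr_cons, ih, List.any_cons, pvPrefixTo]
    by_cases hm : p m = true
    · simp [hm]
    · simp only [Bool.not_eq_true] at hm
      by_cases hr : rest.any p = true <;> simp [hm, hr, pvPrefixTo_eq_nil p rest]

-- B's foldl over enumerate computes k + last relative index (or acc if no match)
theorem pvFoldB {α : Type} (p : α → Bool) (l : List α) (k acc : Int) :
    (PySem.List.enumerate l k).foldl (fun last q => if p q.2 then q.1 else last) acc
      = if l.any p then k + pvLastRel p l else acc := by
  induction l generalizing k acc with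
  | nil => simp [PySem.List.enumerate_nil]
  | cons m rest ih =>
    rw [PySem.List.enumerate_cons, List.foldl_cons, ih]
    simp only [List.any_cons, pvLastRel]
    by_cases hr : rest.any p = true
    · by_cases hm : p m = true <;> simp [hm, hr] <;> ring
    · by_cases hm : p m = true <;> simp [hm, hr]

-- ===== VERDICT (by name: the statement is the Claim_ definition above) =====
theorem extract_module_context_spec : Claim_equal_extract_module_context := by
  intro messages module_name _
  unfold Spec_extract_module_context extract_module_context extract_module_context_alt
  set p : List (String × String) → Bool := fun msg =>
    PySem.Str.isIn (PySem.Str.lower module_name)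
      (PySem.Str.lower ((PySem.Dict.mk msg).getD "content" "")) with hp
  have hA : messages.reverse.foldl
      (fun (st : Bool × List (List (String × String))) msg =>
        let content := (PySem.Dict.mk msg).getD "content" ""
        let found_module := st.1 || PySem.Str.isIn (PySem.Str.lower module_name) (PySem.Str.lower content)
        if found_module then (found_module, PySem.List.insert st.2 0 msg)
        else (found_module, st.2)) (false, [])
      = (messages.any p, pvPrefixTo p messages) := by
    rw [List.foldl_reverse]
    rw [← pvFoldA p messages]
    simp [PySem.List.insert_zero, hp]
  rw [hA]
  dsimp only
  rw [show (PySem.List.enumerate messages 0).foldl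
      (fun (last : Int) q =>
        if PySem.Str.isIn (PySem.Str.lower module_name) (PySem.Str.lower ((PySem.Dict.mk q.2).getD "content" "")) then q.1 else last)
      (-1) = if messages.any p then 0 + pvLastRel p messages else -1 from pvFoldB p messages 0 (-1)]
  simp only [zero_add]
  by_cases h : messages.any p = true
  · have h0 := pvLastRel_nonneg p messages
    have hne : pvPrefixTo p messages ≠ [] := by
      cases messages with
      | nil => simp at h
      | cons m rest =>
        simp only [List.any_cons] at h
        simp [pvPrefixTo, h]
    simp only [h, if_true]
    rw [if_pos hne, if_neg (by omega : ¬ pvLastRel p messages = -1)]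
    rw [PySem.List.slice_to _ (by omega)]
    rw [pvPrefixTo_eq_take p messages h]
    congr 1
    omega
  · simp only [Bool.not_eq_true] at h
    simp [h, pvPrefixTo_eq_nil p messages h]
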